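-- pv_equiv track=rewrite | github.com/gpblaney/rongorongo | KohauCode.py | _sort_sides_for_tablet
-- ===== SOURCE A (Python) =====
-- from typing import Any, Dict, Iterable, List, Optional, Set, Tuple
--
-- def _sort_sides_for_tablet(letter: str, sides: Set[str]) -> List[str]:
--     """Stable UI order: r, v, a, b for normal tablets; a–h for X."""
--     letter_u = letter.upper()
--     sset = {s.lower() for s in sides}
--     if letter_u == "X":
--         return [x for x in "abcdefgh" if x in sset]
--     preferred = ["r", "v", "a", "b"]
--     ordered = [p for p in preferred if p in sset]
--     rest = sorted(sset - set(ordered))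
--     return ordered + rest
-- ===== SOURCE B (Python) =====
-- def _sort_sides_for_tablet(letter, sides):
--     """Stable UI order via one keyed sort: r, v, a, b ranked first, the rest alphabetical; a-h only for X."""
--     sset = {s.lower() for s in sides}
--     if letter.upper() == "X":
--         allowed = set("abcdefgh")
--         return sorted(x for x in sset if x in allowed)
--     rank = {"r": 0, "v": 1, "a": 2, "b": 3}
--     return sorted(sset, key=lambda x: (rank.get(x, 4), x))
-- ===== Notes on version B (the rewrite author's own statement) =====
-- stated objective: idiomatic
-- what changed: Replaces the partition-then-concatenate (preferred-prefix filter plus sorted set difference) with a single sorted() call using a (rank, label) key, and the X branch's fixed-alphabet scan with a filter-then-sort over the set.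
import Mathlib
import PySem

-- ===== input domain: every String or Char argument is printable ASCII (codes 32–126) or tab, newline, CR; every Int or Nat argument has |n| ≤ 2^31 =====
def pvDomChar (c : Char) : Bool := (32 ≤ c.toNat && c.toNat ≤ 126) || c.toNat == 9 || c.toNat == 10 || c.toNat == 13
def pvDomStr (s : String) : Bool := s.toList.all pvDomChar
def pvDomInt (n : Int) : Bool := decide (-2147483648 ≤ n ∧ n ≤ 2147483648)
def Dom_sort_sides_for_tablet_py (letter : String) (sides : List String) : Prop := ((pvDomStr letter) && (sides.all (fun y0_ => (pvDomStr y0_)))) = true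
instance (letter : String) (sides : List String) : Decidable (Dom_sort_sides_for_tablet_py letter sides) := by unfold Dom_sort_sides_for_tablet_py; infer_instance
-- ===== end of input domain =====

-- B replaces A's partition-then-concatenate with one keyed sort ((rank, label) key); return value only, no mutation.

-- ===== PORT A =====
def sort_sides_for_tablet_py (letter : String) (sides : List String) : List String :=
  let letter_u := PySem.Str.upper letter
  let sset : PySem.Set String := PySem.Set.ofList (sides.map PySem.Str.lower)
  if letter_u = "X" then
    (["a","b","c","d","e","f","g","h"] : List String).filter (fun x => PySem.Set.contains sset x)
  else
    let preferred : List String := ["r", "v", "a", "b"]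
    let ordered := preferred.filter (fun p => PySem.Set.contains sset p)
    let rest := PySem.List.sorted (PySem.Set.diff sset (PySem.Set.ofList ordered)) (fun x => x)
    ordered ++ rest

-- ===== PORT B =====
-- rank = {"r": 0, "v": 1, "a": 2, "b": 3}; rank.get(x, 4)
def pvRankB (x : String) : Int :=
  PySem.Dict.getD (PySem.Dict.ofList [("r", (0:Int)), ("v", 1), ("a", 2), ("b", 3)]) x 4

def sort_sides_for_tablet_py_alt (letter : String) (sides : List String) : List String :=
  let sset : PySem.Set String := PySem.Set.ofList (sides.map PySem.Str.lower)
  if PySem.Str.upper letter = "X" then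
    let allowed : PySem.Set String := PySem.Set.ofList ["a","b","c","d","e","f","g","h"]
    PySem.List.sorted (sset.filter (fun x => PySem.Set.contains allowed x)) (fun x => x)
  else
    PySem.List.sorted2 sset pvRankB (fun x => x)

-- ===== PRECONDITION & SPEC =====
def Spec_sort_sides_for_tablet_py (letter : String) (sides : List String) (out : List String) : Prop := out = sort_sides_for_tablet_py_alt letter sides
instance (letter : String) (sides : List String) (out : List String) : Decidable (Spec_sort_sides_for_tablet_py letter sides out) := by unfold Spec_sort_sides_for_tablet_py; infer_instance

-- ===== CLAIM (what is proved, stated in full; the proofs are below) =====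
def Claim_equal_sort_sides_for_tablet_py : Prop := ∀ (letter : String) (sides : List String), Dom_sort_sides_for_tablet_py letter sides → Spec_sort_sides_for_tablet_py letter sides (sort_sides_for_tablet_py letter sides)

-- ===== LEMMAS AND PROOFS =====

-- B's comparison 'key=lambda x: (rank.get(x, 4), x)' as the strict Bool order sorted2 inserts by.
def pvLtB (a b : String) : Bool :=
  decide (pvRankB a < pvRankB b) || (!decide (pvRankB b < pvRankB a) && decide (a < b))

theorem pvLtB_iff (a b : String) :
    pvLtB a b = true ↔ pvRankB a < pvRankB b ∨ (¬ pvRankB b < pvRankB a ∧ a < b) := by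
  simp [pvLtB]

theorem pvSorted2_eq_foldl (xs : List String) :
    PySem.List.sorted2 xs pvRankB (fun x => x)
      = xs.foldl (fun acc x => PySem.List.insertBy pvLtB x acc) [] := rfl

theorem pvLtB_asymm (a b : String) (h1 : pvLtB a b = true) (h2 : pvLtB b a = true) : False := by
  rw [pvLtB_iff] at h1 h2
  rcases h1 with h1 | ⟨h1, h1'⟩ <;> rcases h2 with h2 | ⟨h2, h2'⟩
  · exact absurd h2 (lt_asymm h1)
  · exact absurd h1 h2
  · exact absurd h2 h1
  · exact absurd h2' (lt_asymm h1')

theorem pvLtB_trans (a b c : String) (h1 : pvLtB a b = true) (h2 : pvLtB b c = true) : pvLtB a c = true := by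
  rw [pvLtB_iff] at h1 h2 ⊢
  rcases h1 with h1 | ⟨h1, h1'⟩ <;> rcases h2 with h2 | ⟨h2, h2'⟩
  · exact Or.inl (by omega)
  · exact Or.inl (by omega)
  · exact Or.inl (by omega)
  · exact Or.inr ⟨by omega, lt_trans h1' h2'⟩

theorem pvLtB_total (a b : String) (h : a ≠ b) : pvLtB a b = true ∨ pvLtB b a = true := by
  rcases lt_trichotomy (pvRankB a) (pvRankB b) with hr | hr | hr
  · exact Or.inl ((pvLtB_iff a b).mpr (Or.inl hr))
  · rcases lt_or_gt_of_ne h with hs | hs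
    · exact Or.inl ((pvLtB_iff a b).mpr (Or.inr ⟨by omega, hs⟩))
    · exact Or.inr ((pvLtB_iff b a).mpr (Or.inr ⟨by omega, hs⟩))
  · exact Or.inr ((pvLtB_iff b a).mpr (Or.inl hr))

theorem pvLtB_of_rank_lt (a b : String) (h : pvRankB a < pvRankB b) : pvLtB a b = true :=
  (pvLtB_iff a b).mpr (Or.inl h)

theorem pvLtB_of_rank_eq_lt (a b : String) (h : pvRankB a = pvRankB b) (h' : a < b) : pvLtB a b = true :=
  (pvLtB_iff a b).mpr (Or.inr ⟨by omega, h'⟩)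

theorem pvRankB_of_not_mem (x : String) (h : x ∉ (["r","v","a","b"] : List String)) : pvRankB x = 4 := by
  simp at h
  have e : (PySem.Dict.ofList [("r",(0:Int)),("v",1),("a",2),("b",3)]) = PySem.Dict.mk [("r",0),("v",1),("a",2),("b",3)] := by decide
  have h1 : (("r":String) == x) = false := beq_eq_false_iff_ne.mpr (Ne.symm h.1)
  have h2 : (("v":String) == x) = false := beq_eq_false_iff_ne.mpr (Ne.symm h.2.1)
  have h3 : (("a":String) == x) = false := beq_eq_false_iff_ne.mpr (Ne.symm h.2.2.1)
  have h4 : (("b":String) == x) = false := beq_eq_false_iff_ne.mpr (Ne.symm h.2.2.2)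
  simp [pvRankB, e, PySem.Dict.getD, PySem.Dict.get?, List.find?, h1, h2, h3, h4]

theorem pvRankB_le_three (a : String) (h : a ∈ (["r","v","a","b"] : List String)) : pvRankB a ≤ 3 := by
  fin_cases h <;> decide

theorem pvPairwise_insertBy (x : String) (l : List String)
    (hl : l.Pairwise (fun a b => pvLtB a b = true)) (hx : ∀ y ∈ l, y ≠ x) :
    (PySem.List.insertBy pvLtB x l).Pairwise (fun a b => pvLtB a b = true) := by
  induction l with
  | nil => simp [PySem.List.insertBy]
  | cons y ys ih =>
    rw [show PySem.List.insertBy pvLtB x (y :: ys)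
          = if pvLtB x y then x :: y :: ys else y :: PySem.List.insertBy pvLtB x ys from rfl]
    rcases List.pairwise_cons.mp hl with ⟨hy, hys⟩
    by_cases hxy : pvLtB x y = true
    · simp only [hxy, if_true]
      refine List.pairwise_cons.mpr ⟨?_, hl⟩
      intro z hz
      rcases List.mem_cons.mp hz with hz | hz
      · exact hz ▸ hxy
      · exact pvLtB_trans x y z hxy (hy z hz)
    · rw [if_neg hxy]
      have hyx : pvLtB y x = true := by
        rcases pvLtB_total y x (fun he => (hx y (by simp) ) he) with h | h
        · exact h
        · exact absurd h hxy
      refine List.pairwise_cons.mpr ⟨?_, ih hys (fun z hz => hx z (by simp [hz]))⟩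
      intro z hz
      rcases (PySem.List.insertBy_mem_iff pvLtB x z ys).mp hz with hz | hz
      · subst hz; exact hyx
      · exact hy z hz

theorem pvFoldl_insertBy_invariant (xs : List String) (hnd : xs.Nodup) :
    ∀ acc : List String, acc.Pairwise (fun a b => pvLtB a b = true) → (∀ x ∈ xs, x ∉ acc) →
      (xs.foldl (fun acc x => PySem.List.insertBy pvLtB x acc) acc).Pairwise (fun a b => pvLtB a b = true)
      ∧ (xs.foldl (fun acc x => PySem.List.insertBy pvLtB x acc) acc).Perm (xs ++ acc) := by
  induction xs with
  | nil => intro acc h _; exact ⟨h, by simp⟩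
  | cons x xs ih =>
    intro acc hacc hdisj
    have hndx : x ∉ xs := (List.nodup_cons.mp hnd).1
    have hnd' : xs.Nodup := (List.nodup_cons.mp hnd).2
    have hpw' : (PySem.List.insertBy pvLtB x acc).Pairwise (fun a b => pvLtB a b = true) :=
      pvPairwise_insertBy x acc hacc (fun y hy => fun he => hdisj x (by simp) (he ▸ hy))
    have hdisj' : ∀ z ∈ xs, z ∉ PySem.List.insertBy pvLtB x acc := by
      intro z hz hmem
      rcases (PySem.List.insertBy_mem_iff pvLtB x z acc).mp hmem with h | h
      · exact hndx (h ▸ hz)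
      · exact hdisj z (by simp [hz]) h
    rcases ih hnd' (PySem.List.insertBy pvLtB x acc) hpw' hdisj' with ⟨h1, h2⟩
    refine ⟨h1, h2.trans ?_⟩
    exact (List.Perm.append_left xs (PySem.List.insertBy_perm pvLtB x acc)).trans List.perm_middle

theorem pvFoldl_insertBy_eq (xs ys : List String) (hnd : xs.Nodup)
    (hperm : ys.Perm xs) (hpw : ys.Pairwise (fun a b => pvLtB a b = true)) :
    xs.foldl (fun acc x => PySem.List.insertBy pvLtB x acc) [] = ys := by
  rcases pvFoldl_insertBy_invariant xs hnd [] (by simp) (by simp) with ⟨h1, h2⟩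
  have h2' : (xs.foldl (fun acc x => PySem.List.insertBy pvLtB x acc) []).Perm xs := by simpa using h2
  refine List.Perm.eq_of_pairwise ?_ h1 hpw (h2'.trans hperm.symm)
  intro a b _ _ hab hba
  exact absurd hba (fun hba => pvLtB_asymm a b hab hba)

theorem pvMem_contains (S : List String) (x : String) :
    (PySem.Set.contains S x = true) ↔ x ∈ S := by
  simp [PySem.Set.contains]

-- the X branch: A's fixed-alphabet scan equals B's filter-then-sort
theorem pvXBranch (S : List String) (hnd : S.Nodup) :
    PySem.List.sorted
        (S.filter (fun x => PySem.Set.contains (PySem.Set.ofList (["a","b","c","d","e","f","g","h"] : List String)) x)) (fun x => x)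
      = (["a","b","c","d","e","f","g","h"] : List String).filter (fun x => PySem.Set.contains S x) := by
  apply PySem.List.sorted_eq_of_perm_of_pairwise_lt
  · rw [List.perm_ext_iff_of_nodup (List.Nodup.filter _ (by decide)) (List.Nodup.filter _ hnd)]
    intro x
    simp only [List.mem_filter, pvMem_contains, PySem.Set.mem_ofList]
    exact ⟨fun ⟨h1, h2⟩ => ⟨h2, h1⟩, fun ⟨h1, h2⟩ => ⟨h2, h1⟩⟩
  · refine List.Pairwise.filter _ (List.Pairwise.imp ?_ (?_ : List.Pairwise (fun a b : String => a.toList < b.toList) _))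
    · intro a b h; exact String.lt_iff_toList_lt.mpr h
    · decide

-- the non-X branch: A's preferred-prefix ++ sorted-rest equals B's single keyed sort
theorem pvNonXBranch (S : List String) (hnd : S.Nodup) :
    PySem.List.sorted2 S pvRankB (fun x => x)
      = ((["r","v","a","b"] : List String).filter (fun p => PySem.Set.contains S p))
        ++ PySem.List.sorted
             (PySem.Set.diff S (PySem.Set.ofList ((["r","v","a","b"] : List String).filter (fun p => PySem.Set.contains S p)))) (fun x => x) := by
  rw [pvSorted2_eq_foldl]
  set pref : List String := ["r","v","a","b"] with hpref
  set ordered := pref.filter (fun p => PySem.Set.contains S p) with hordered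
  set rest := PySem.List.sorted (PySem.Set.diff S (PySem.Set.ofList ordered)) (fun x => x) with hrest
  have hdiff_def : PySem.Set.diff S (PySem.Set.ofList ordered)
      = S.filter (fun x => !(PySem.Set.ofList ordered).contains x) := rfl
  have hmem_rest : ∀ x, x ∈ rest ↔ x ∈ S ∧ x ∉ ordered := by
    intro x
    rw [hrest, PySem.List.mem_sorted, hdiff_def, List.mem_filter]
    simp [PySem.Set.contains, PySem.Set.mem_ofList]
  have hmem_ordered : ∀ x, x ∈ ordered ↔ x ∈ pref ∧ x ∈ S := by
    intro x; rw [hordered, List.mem_filter, pvMem_contains]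
  have hrest_not_pref : ∀ x ∈ rest, x ∉ pref := by
    intro x hx hpx
    rcases (hmem_rest x).mp hx with ⟨hxS, hxo⟩
    exact hxo ((hmem_ordered x).mpr ⟨hpx, hxS⟩)
  have hrest_rank : ∀ x ∈ rest, pvRankB x = 4 := fun x hx => pvRankB_of_not_mem x (hrest_not_pref x hx)
  have hnd_rest : rest.Nodup := (PySem.List.sorted_perm _ _ _).symm.nodup (hdiff_def ▸ List.Nodup.filter _ hnd)
  apply pvFoldl_insertBy_eq S _ hnd
  · -- permutation
    rw [List.perm_ext_iff_of_nodup ?_ hnd]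
    · intro x
      rw [List.mem_append, hmem_ordered, hmem_rest]
      constructor
      · rintro (⟨_, h⟩ | ⟨h, _⟩) <;> exact h
      · intro hxS
        by_cases ho : x ∈ ordered
        · exact Or.inl ((hmem_ordered x).mp ho)
        · exact Or.inr ⟨hxS, ho⟩
    · rw [List.nodup_append]
      refine ⟨List.Nodup.filter _ (by decide), hnd_rest, ?_⟩
      intro a ha b hb he
      exact (hmem_rest b).mp hb |>.2 (he ▸ ha)
  · -- pairwise
    rw [List.pairwise_append]
    refine ⟨List.Pairwise.filter _ (by decide), ?_, ?_⟩
    · have hle : rest.Pairwise (fun a b : String => a ≤ b) := by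
        simpa using PySem.List.sorted_pairwise (PySem.Set.diff S (PySem.Set.ofList ordered)) (fun x : String => x)
      have hne : rest.Pairwise (fun a b : String => a ≠ b) := hnd_rest
      refine List.Pairwise.imp_of_mem ?_ (hle.and hne)
      intro a b ha hb hab
      exact pvLtB_of_rank_eq_lt a b (by rw [hrest_rank a ha, hrest_rank b hb]) (lt_of_le_of_ne hab.1 hab.2)
    · intro a ha b hb
      have ha' : a ∈ pref := ((hmem_ordered a).mp ha).1
      have h4 : pvRankB b = 4 := hrest_rank b hb
      exact pvLtB_of_rank_lt a b (by have := pvRankB_le_three a ha'; omega)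

-- ===== VERDICT (by name: the statement is the Claim_ definition above) =====
theorem sort_sides_for_tablet_py_spec : Claim_equal_sort_sides_for_tablet_py := by
  intro letter sides _
  unfold Spec_sort_sides_for_tablet_py sort_sides_for_tablet_py sort_sides_for_tablet_py_alt
  have hnd : (PySem.Set.ofList (sides.map PySem.Str.lower)).Nodup := PySem.Set.nodup_ofList _
  by_cases hX : PySem.Str.upper letter = "X"
  · simp only [hX, if_true]
    exact (pvXBranch _ hnd).symm
  · simp only [if_neg hX]
    exact (pvNonXBranch _ hnd).symm
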